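-- pv_equiv track=rewrite | github.com/lemurey/advent_of_code | 2025/day03.py | get_answer
-- ===== SOURCE A (Python) =====
-- def get_joltage(bank, size=2):
--     fbank = str(bank)
--     values = []
--     for i in range(1, size+1):
--         if i == size:
--             value = max(fbank)
--         else:
--             value = max(fbank[:-size+i])
--         index = fbank.index(value)
--         fbank = fbank[index+1:]
--         values.append(value)
--     return int(''.join(values))
--
-- def get_answer(data, part2=False):
--     output = 0
--     size = 2
--     if part2:
--         size = 12
--     for bank in data:
--         joltage = get_joltage(bank, size)
--         output += joltage
--     return output
-- ===== SOURCE B (Python) =====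
-- def get_joltage(bank, size=2):
--     s = str(bank)
--     to_drop = len(s) - size
--     if to_drop < 0:
--         raise ValueError("bank has fewer digits than the selection size")
--     stack = []
--     for ch in s:
--         while to_drop > 0 and stack and stack[-1] < ch:
--             stack.pop()
--             to_drop -= 1
--         stack.append(ch)
--     return int(''.join(stack[:size]))
--
--
-- def get_answer(data, part2=False):
--     size = 12 if part2 else 2
--     return sum(get_joltage(bank, size) for bank in data)
-- ===== Notes on version B (the rewrite author's own statement) =====
-- stated objective: alternative
-- what changed: Per bank, the greedy repeated max-of-prefix/index/slice selection is replaced by a single-pass monotonic-stack selection of the lexicographically largest length-size digit subsequence, and the summing loop becomes sum over a generator.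
import Mathlib
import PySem

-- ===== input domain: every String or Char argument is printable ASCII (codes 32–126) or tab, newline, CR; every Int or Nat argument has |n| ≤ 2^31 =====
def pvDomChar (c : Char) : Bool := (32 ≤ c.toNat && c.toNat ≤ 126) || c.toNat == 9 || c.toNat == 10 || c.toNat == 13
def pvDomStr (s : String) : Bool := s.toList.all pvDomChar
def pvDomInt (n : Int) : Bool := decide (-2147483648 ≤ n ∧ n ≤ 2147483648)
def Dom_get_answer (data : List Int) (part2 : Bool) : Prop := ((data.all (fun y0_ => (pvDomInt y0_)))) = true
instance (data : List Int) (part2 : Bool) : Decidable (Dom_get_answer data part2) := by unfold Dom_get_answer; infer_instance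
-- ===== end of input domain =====

-- B replaces A's per-bank greedy max/index/slice selection by a one-pass monotonic-stack
-- selection (alternative algorithm; return-value equivalence only).

-- ===== PORT A =====
-- one iteration of A's 'for i in range(1, size+1)' loop; state = (fbank, values), strings as char lists
def jolt_step (size : Int) (st : List Char × List Char) (i : Int) : List Char × List Char :=
  let fbank := st.1
  -- max('') raises ValueError in Python; those inputs are excluded by Pre_; ' ' is never used
  let value : Char :=
    (if i = size then PySem.List.max? fbank (fun c => c)
     else PySem.List.max? (PySem.List.slice fbank none (some (-size + i))) (fun c => c)).getD ' '
  -- fbank.index(value): value ∈ fbank under Pre_, so the default is never used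
  let index : Nat := (PySem.List.index? fbank value).getD 0
  (PySem.List.slice fbank (some ((index : Int) + 1)) none, st.2 ++ [value])

def get_joltage (bank : Int) (size : Int) : Int :=
  let fbank := (PySem.Int.toStr bank).toList
  let r := (PySem.List.pyRange 1 (size + 1) 1).foldl (jolt_step size) (fbank, [])
  -- int(''.join(values)): never ValueError under Pre_ (the joined selection is a valid int literal)
  (PySem.Int.ofChars? r.2).getD 0

def get_answer (data : List Int) (part2 : Bool) : Int :=
  let size : Int := if part2 then 12 else 2
  data.foldl (fun output bank => output + get_joltage bank size) 0

-- ===== PORT B =====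
-- the inner 'while to_drop > 0 and stack and stack[-1] < ch: stack.pop(); to_drop -= 1';
-- the stack is held reversed (head = Python's stack[-1])
def popDrops (ch : Char) : List Char → Int → List Char × Int
  | [], d => ([], d)
  | t :: st, d => if 0 < d ∧ t < ch then popDrops ch st (d - 1) else (t :: st, d)

def pushChar (st : List Char × Int) (ch : Char) : List Char × Int :=
  let r := popDrops ch st.1 st.2
  (ch :: r.1, r.2)

def get_joltage_alt (bank : Int) (size : Nat) : Int :=
  let s := (PySem.Int.toStr bank).toList
  -- 'if to_drop < 0: raise ValueError' — raising inputs are outside Pre_; 0 is never used there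
  if s.length < size then 0 else
  let r := s.foldl pushChar ([], (s.length : Int) - size)
  -- stack[:size] on the reversed representation is r.1.reverse.take size
  (PySem.Int.ofChars? (r.1.reverse.take size)).getD 0

def get_answer_alt (data : List Int) (part2 : Bool) : Int :=
  let size : Nat := if part2 then 12 else 2
  (data.map (fun bank => get_joltage_alt bank size)).sum

-- ===== PRECONDITION & SPEC =====
-- Pre_ excludes exactly the inputs where A raises ValueError: some bank whose str() has
-- fewer characters than the selection size (max() is then called on an empty string/slice).
def Pre_get_answer (data : List Int) (part2 : Bool) : Prop :=
  ∀ bank ∈ data, (if part2 then 12 else 2) ≤ (PySem.Int.toStr bank).toList.length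
instance (data : List Int) (part2 : Bool) : Decidable (Pre_get_answer data part2) := by
  unfold Pre_get_answer; infer_instance

def pvWitness_get_answer : List Int × Bool := ([987654321, 12345, -5, 10], false)

def Spec_get_answer (data : List Int) (part2 : Bool) (out : Int) : Prop := out = get_answer_alt data part2
instance (data : List Int) (part2 : Bool) (out : Int) : Decidable (Spec_get_answer data part2 out) := by unfold Spec_get_answer; infer_instance

-- ===== CLAIM (what is proved, stated in full; the proofs are below) =====
def Claim_equal_get_answer : Prop := ∀ (data : List Int) (part2 : Bool), Dom_get_answer data part2 → Pre_get_answer data part2 → Spec_get_answer data part2 (get_answer data part2)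

-- ===== LEMMAS AND PROOFS =====

-- the common greedy selection both programs compute: at each step pick the first maximal
-- character of the window that leaves enough characters for the remaining picks
def greedy : List Char → Nat → List Char
  | _, 0 => []
  | s, k + 1 =>
    match PySem.List.max? (s.take (s.length - k)) (fun c => c) with
    | none => []
    | some m => m :: greedy (s.drop ((PySem.List.index? s m).getD 0 + 1)) k

-- selection facts: the window's first maximum exists and its first index in s lies in the window
lemma select (s : List Char) (k : Nat) (h : k + 1 ≤ s.length) :
    ∃ m j, PySem.List.max? (s.take (s.length - k)) (fun c => c) = some m ∧
      PySem.List.index? s m = some j ∧ j < s.length - k ∧ s[j]? = some m ∧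
      (∀ q, q < j → s[q]? ≠ some m) ∧
      (∀ x ∈ s.take (s.length - k), x ≤ m) := by
  have hlen : (s.take (s.length - k)).length = s.length - k := by
    rw [List.length_take]; omega
  have hwne : s.take (s.length - k) ≠ [] := by
    intro hnil; rw [hnil] at hlen; simp at hlen; omega
  obtain ⟨m, hm⟩ : ∃ m, PySem.List.max? (s.take (s.length - k)) (fun c => c) = some m := by
    cases hmx : PySem.List.max? (s.take (s.length - k)) (fun c => c) with
    | none => exact absurd ((PySem.List.max?_eq_none_iff _ _).mp hmx) hwne
    | some m => exact ⟨m, rfl⟩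
  have hmemw : m ∈ s.take (s.length - k) := PySem.List.max?_mem hm
  have hmem : m ∈ s := List.mem_of_mem_take hmemw
  obtain ⟨j, hj⟩ : ∃ j, PySem.List.index? s m = some j := by
    cases hix : PySem.List.index? s m with
    | none => exact absurd hmem ((PySem.List.index?_eq_none_iff _ _).mp hix)
    | some j => exact ⟨j, rfl⟩
  obtain ⟨hjlt, hsj, hne⟩ := PySem.List.getElem_of_index?_eq_some hj
  obtain ⟨q, hq, hqe⟩ := List.getElem_of_mem hmemw
  rw [hlen] at hq
  have hsq : s[q]'(by omega) = m := by
    rw [← hqe]; exact (List.getElem_take).symm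
  have hjq : j ≤ q := by
    by_contra hc
    exact hne q (by omega) hsq
  refine ⟨m, j, hm, hj, by omega, ?_, ?_, ?_⟩
  · rw [List.getElem?_eq_getElem hjlt, hsj]
  · intro q' hq' hq'e
    have hq'lt : q' < s.length := by omega
    rw [List.getElem?_eq_getElem hq'lt] at hq'e
    exact hne q' hq' (Option.some_injective _ hq'e)
  · intro x hx
    exact PySem.List.max?_isMax hm x hx

lemma pre_lt (s : List Char) (m : Char) (j k : Nat) (hj : j < s.length - k)
    (hne : ∀ q, q < j → s[q]? ≠ some m)
    (hle : ∀ x ∈ s.take (s.length - k), x ≤ m) :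
    ∀ x ∈ s.take j, x < m := by
  intro x hx
  obtain ⟨q, hq, hqe⟩ := List.getElem_of_mem hx
  have hqj : q < j := by
    rw [List.length_take] at hq; omega
  have hql : q < s.length := by omega
  have hsq : s[q]'hql = x := by rw [← hqe]; exact (List.getElem_take).symm
  have hxle : x ≤ m := by
    apply hle
    have : (s.take (s.length - k))[q]'(by simp [List.length_take]; omega) = x := by
      rw [List.getElem_take]; exact hsq
    rw [← this]; exact List.getElem_mem _
  have hxne : x ≠ m := by
    intro he
    exact hne q hqj (by rw [List.getElem?_eq_getElem hql, hsq, he])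
  exact lt_of_le_of_ne hxle hxne

-- ---- B side: the monotonic stack computes greedy ----

lemma popDrops_spec (ch : Char) : ∀ (st : List Char) (d : Int),
    ∃ p : Nat, popDrops ch st d = (st.drop p, d - p) ∧ p ≤ st.length ∧ (p = 0 ∨ 0 ≤ d - p) := by
  intro st
  induction st with
  | nil => intro d; exact ⟨0, by simp [popDrops], by simp, Or.inl rfl⟩
  | cons t st ih =>
    intro d
    by_cases h : 0 < d ∧ t < ch
    · obtain ⟨p, he, hp, hd⟩ := ih (d - 1)
      refine ⟨p + 1, ?_, by simp; omega, by omega⟩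
      rw [popDrops, if_pos h, he, List.drop_succ_cons]
      congr 1
      push_cast; ring
    · exact ⟨0, by simp [popDrops, h], by simp, Or.inl rfl⟩

lemma popDrops_all_lt (ch : Char) : ∀ (st : List Char) (d : Int),
    (∀ x ∈ st, x < ch) → (st.length : Int) ≤ d → popDrops ch st d = ([], d - st.length) := by
  intro st
  induction st with
  | nil => intro d _ _; simp [popDrops]
  | cons t st ih =>
    intro d hlt hd
    simp only [List.length_cons] at hd
    have h0 : 0 < d := by push_cast at hd; omega
    rw [popDrops, if_pos ⟨h0, hlt t (by simp)⟩,
      ih (d - 1) (fun x hx => hlt x (by simp [hx])) (by push_cast at hd ⊢; omega)]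
    congr 1
    simp only [List.length_cons]
    push_cast; ring

lemma popDrops_append (ch m : Char) : ∀ (st : List Char) (d : Int),
    (ch ≤ m ∨ d ≤ (st.length : Int)) →
    popDrops ch (st ++ [m]) d = ((popDrops ch st d).1 ++ [m], (popDrops ch st d).2) := by
  intro st
  induction st with
  | nil =>
    intro d h
    have hno : ¬ (0 < d ∧ m < ch) := by
      rcases h with h | h
      · rintro ⟨_, hmc⟩; exact absurd h (not_le.mpr hmc)
      · rintro ⟨hd, _⟩; simp at h; omega
    simp [popDrops, hno]
  | cons t st ih =>
    intro d h
    by_cases hc : 0 < d ∧ t < ch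
    · rw [List.cons_append, popDrops, if_pos hc, popDrops, if_pos hc]
      refine ih (d - 1) ?_
      rcases h with h | h
      · exact Or.inl h
      · right; simp only [List.length_cons] at h; push_cast at h ⊢; omega
    · rw [List.cons_append, popDrops, if_neg hc, popDrops, if_neg hc]
      simp

lemma phase1_inv (m : Char) : ∀ (pre st0 : List Char) (d0 : Int),
    (∀ x ∈ st0, x < m) → (∀ x ∈ pre, x < m) →
    (∀ x ∈ (pre.foldl pushChar (st0, d0)).1, x < m) ∧
    ((pre.foldl pushChar (st0, d0)).1.length : Int) - (pre.foldl pushChar (st0, d0)).2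
      = (st0.length : Int) + pre.length - d0 := by
  intro pre
  induction pre with
  | nil => intro st0 d0 h0 _; exact ⟨h0, by simp⟩
  | cons c pre ih =>
    intro st0 d0 h0 hp
    obtain ⟨p, he, hple, _⟩ := popDrops_spec c st0 d0
    have hstep : pushChar (st0, d0) c = (c :: st0.drop p, d0 - p) := by
      simp [pushChar, he]
    rw [List.foldl_cons, hstep]
    have hc : c < m := hp c (by simp)
    obtain ⟨ih1, ih2⟩ := ih (c :: st0.drop p) (d0 - p)
      (by
        intro x hx
        rcases List.mem_cons.mp hx with h | h
        · subst h; exact hc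
        · exact h0 x (List.mem_of_mem_drop h))
      (fun x hx => hp x (by simp [hx]))
    refine ⟨ih1, ?_⟩
    rw [ih2]
    simp only [List.length_cons, List.length_drop]
    push_cast [hple]
    ring

lemma phase1 (m : Char) (pre : List Char) (d : Int)
    (hlt : ∀ x ∈ pre, x < m) (hd : (pre.length : Int) ≤ d) :
    (pre ++ [m]).foldl pushChar ([], d) = ([m], d - pre.length) := by
  rw [List.foldl_append]
  obtain ⟨h1, h2⟩ := phase1_inv m pre [] d (by simp) hlt
  set r := pre.foldl pushChar ([], d) with hr
  simp only [List.length_nil, Nat.cast_zero, zero_add] at h2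
  have hfin : (r.1.length : Int) ≤ r.2 := by omega
  have hpop := popDrops_all_lt m r.1 r.2 h1 hfin
  show pushChar r m = ([m], d - pre.length)
  rw [show pushChar r m = (m :: (popDrops m r.1 r.2).1, (popDrops m r.1 r.2).2) from rfl, hpop]
  refine congrArg _ ?_
  omega

lemma par (m : Char) : ∀ (rest st0 : List Char) (b : Int),
    (∀ (q : Nat), (hq : q < rest.length) → m < rest[q] → b ≤ (st0.length : Int) + q) →
    rest.foldl pushChar (st0 ++ [m], b)
      = ((rest.foldl pushChar (st0, b)).1 ++ [m], (rest.foldl pushChar (st0, b)).2) := by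
  intro rest
  induction rest with
  | nil => intro st0 b _; simp
  | cons c rest ih =>
    intro st0 b hyp
    rw [List.foldl_cons, List.foldl_cons]
    have hcond : c ≤ m ∨ b ≤ (st0.length : Int) := by
      by_cases hc : c ≤ m
      · exact Or.inl hc
      · right
        have := hyp 0 (by simp) (by simpa using not_le.mp hc)
        simpa using this
    obtain ⟨p, he, hple, _⟩ := popDrops_spec c st0 b
    have hstep2 : pushChar (st0 ++ [m], b) c = ((c :: st0.drop p) ++ [m], b - p) := by
      simp [pushChar, popDrops_append c m st0 b hcond, he]
    have hstep1 : pushChar (st0, b) c = (c :: st0.drop p, b - p) := by simp [pushChar, he]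
    rw [hstep1, hstep2]
    apply ih
    intro q hq hmq
    have := hyp (q + 1) (by simpa using hq) (by simpa using hmq)
    simp only [List.length_cons, List.length_drop] at this ⊢
    push_cast [hple] at this ⊢
    omega

lemma stack_eq_greedy : ∀ (k : Nat) (s : List Char), k ≤ s.length →
    (s.foldl pushChar ([], (s.length : Int) - k)).1.reverse.take k = greedy s k := by
  intro k
  induction k with
  | zero => intro s _; simp [greedy]
  | succ k ih =>
    intro s h
    obtain ⟨m, j, hm, hj, hjlt, hsj, hne, hle⟩ := select s k h
    have hjlen : j < s.length := by omega
    have hsjv : s[j]'hjlen = m := by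
      rw [List.getElem?_eq_getElem hjlen] at hsj
      exact Option.some_injective _ hsj
    have hdropj : s.drop j = m :: s.drop (j + 1) := by
      rw [← List.getElem_cons_drop hjlen, hsjv]
    have hsplit : s = (s.take j ++ [m]) ++ s.drop (j + 1) := by
      conv_lhs => rw [← List.take_append_drop j s, hdropj]
      simp
    set pre := s.take j with hpre
    set rest := s.drop (j + 1) with hrest
    have hprelen : pre.length = j := by rw [hpre, List.length_take]; omega
    have hrestlen : rest.length = s.length - (j + 1) := by rw [hrest, List.length_drop]
    have hplt : ∀ x ∈ pre, x < m := pre_lt s m j k hjlt hne hle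
    have hfold : s.foldl pushChar ([], (s.length : Int) - (k + 1 : Nat))
        = rest.foldl pushChar ((pre ++ [m]).foldl pushChar ([], (s.length : Int) - (k + 1 : Nat)))
          := by rw [← List.foldl_append, ← hsplit]
    rw [hfold, phase1 m pre _ hplt (by rw [hprelen]; push_cast; omega)]
    set b : Int := (s.length : Int) - (k + 1 : Nat) - pre.length with hbdef
    have hb : b = (rest.length : Int) - k := by
      rw [hbdef, hprelen, hrestlen]; push_cast; omega
    have hyp : ∀ (q : Nat), (hq : q < rest.length) → m < rest[q] → b ≤ (([] : List Char).length : Int) + q := by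
      intro q hq hmq
      simp only [List.length_nil, Nat.cast_zero, zero_add]
      by_contra hcon
      have hqb : (q : Int) < b := by omega
      have hqwin : j + 1 + q < s.length - k := by
        rw [hbdef, hprelen] at hqb; push_cast at hqb; omega
      have hq' : q < (s.drop (j + 1)).length := by rw [← hrest]; exact hq
      have hrq : rest[q] = (s.drop (j + 1))[q]'hq' := by
        congr 1
      have hrq2 : (s.drop (j + 1))[q]'hq' = s[j + 1 + q]'(by omega) := List.getElem_drop ..
      have hwl : j + 1 + q < (s.take (s.length - k)).length := by
        rw [List.length_take]; omega
      have htk : (s.take (s.length - k))[j + 1 + q]'hwl = s[j + 1 + q]'(by omega) :=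
        List.getElem_take ..
      have hmem : s[j + 1 + q]'(by omega) ∈ s.take (s.length - k) := by
        rw [← htk]; exact List.getElem_mem _
      have hmq' : m < s[j + 1 + q]'(by omega) := by rw [← hrq2, ← hrq]; exact hmq
      exact absurd (hle _ hmem) (not_le.mpr hmq')
    have hpar := par m rest [] b hyp
    simp only [List.nil_append] at hpar
    rw [hpar]
    set r := (rest.foldl pushChar ([], b)).1 with hrdef
    rw [List.reverse_append, List.reverse_singleton, List.singleton_append, List.take_succ_cons]
    have hklen : k ≤ rest.length := by omega
    have hih := ih rest hklen
    rw [← hb] at hih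
    rw [hih]
    show (m :: greedy rest k) = greedy s (k + 1)
    have hg : greedy s (k + 1) = m :: greedy (s.drop ((PySem.List.index? s m).getD 0 + 1)) k := by
      rw [greedy, hm]
    rw [hg, hj, Option.getD_some, ← hrest]

-- ---- A side: the repeated max/index/slice loop computes greedy ----

lemma joltA (size : Int) : ∀ (k : Nat) (s vs : List Char), k ≤ s.length →
    ((PySem.List.pyRange (size + 1 - k) (size + 1) 1).foldl (jolt_step size) (s, vs)).2
      = vs ++ greedy s k := by
  intro k
  induction k with
  | zero =>
    intro s vs _
    rw [PySem.List.pyRange_one_eq_nil (by push_cast; omega)]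
    simp [greedy]
  | succ k ih =>
    intro s vs h
    rw [PySem.List.pyRange_one_cons (by push_cast; omega), List.foldl_cons]
    obtain ⟨m, j, hm, hj, hjlt, hsj, hne, hle⟩ := select s k h
    have hstep : jolt_step size (s, vs) (size + 1 - (k + 1 : Nat)) = (s.drop (j + 1), vs ++ [m]) := by
      unfold jolt_step
      have hvalue : (if (size + 1 - ((k : Nat) + 1 : Nat) : Int) = size then PySem.List.max? s (fun c => c)
          else PySem.List.max? (PySem.List.slice s none (some (-size + (size + 1 - ((k : Nat) + 1 : Nat) : Int)))) (fun c => c)) = some m := by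
        by_cases hk : k = 0
        · subst hk
          rw [if_pos (by push_cast; ring)]
          rw [show s.take (s.length - 0) = s from by simp] at hm
          exact hm
        · rw [if_neg (by push_cast; omega)]
          rw [show (-size + (size + 1 - ((k : Nat) + 1 : Nat) : Int)) = -((k : Nat) : Int) from by push_cast; ring]
          rw [PySem.List.slice_to_neg_natCast s k (by omega)]
          exact hm
      simp only [hvalue, Option.getD_some, hj]
      rw [show ((((j : Nat) : Int)) + 1) = (((j + 1 : Nat) : Int)) from by push_cast; ring]
      rw [PySem.List.slice_from_natCast]
    rw [hstep]
    have hnext : (size + 1 - (k + 1 : Nat) + 1 : Int) = size + 1 - (k : Nat) := by push_cast; ring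
    rw [hnext]
    rw [ih (s.drop (j + 1)) (vs ++ [m]) (by rw [List.length_drop]; omega)]
    rw [List.append_assoc]
    congr 1
    show ([m] : List Char) ++ greedy (s.drop (j + 1)) k = greedy s (k + 1)
    have hg : greedy s (k + 1) = m :: greedy (s.drop ((PySem.List.index? s m).getD 0 + 1)) k := by
      rw [greedy, hm]
    rw [hg, hj, Option.getD_some, List.singleton_append]

lemma joltage_eq (bank : Int) (k : Nat) (h : k ≤ (PySem.Int.toStr bank).toList.length) :
    get_joltage bank (k : Int) = get_joltage_alt bank k := by
  unfold get_joltage get_joltage_alt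
  dsimp only
  rw [if_neg (Nat.not_lt.mpr h)]
  have hA := joltA (k : Int) k ((PySem.Int.toStr bank).toList) [] h
  rw [show ((k : Int) + 1 - (k : Nat)) = 1 from by ring] at hA
  rw [hA, List.nil_append, stack_eq_greedy k _ h]

lemma sum_eq (sz : Int) (k : Nat) (hsz : sz = (k : Int)) :
    ∀ (data : List Int) (a : Int), (∀ bank ∈ data, k ≤ (PySem.Int.toStr bank).toList.length) →
    data.foldl (fun output bank => output + get_joltage bank sz) a
      = a + (data.map (fun bank => get_joltage_alt bank k)).sum := by
  subst hsz
  intro data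
  induction data with
  | nil => intro a _; simp
  | cons b t ih =>
    intro a hp
    rw [List.foldl_cons, List.map_cons, List.sum_cons,
      ih (a + get_joltage b (k : Int)) (fun x hx => hp x (by simp [hx])),
      joltage_eq b k (hp b (by simp))]
    ring

-- ===== VERDICT (by name: the statement is the Claim_ definition above) =====
theorem get_answer_spec : Claim_equal_get_answer := by
  intro data part2 _hdom hpre
  unfold Spec_get_answer get_answer get_answer_alt
  cases part2 <;> simp only [if_true, if_false, Bool.false_eq_true] <;>
    [ (rw [sum_eq 2 2 rfl data 0 (by simpa [Pre_get_answer] using hpre)]; simp) ;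
      (rw [sum_eq 12 12 rfl data 0 (by simpa [Pre_get_answer] using hpre)]; simp) ]
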